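-- pv_equiv track=rewrite | github.com/ednira/cnets_project | dep_matrix.py | find_long_distance
-- ===== SOURCE A (Python) =====
-- def find_long_distance(lst, a, b):
--    """Count successor activity occurrences"""
--    pairs_count = 0
--    last_a_index = None
--    min_distance = 2
--
--    for i, element in enumerate(lst):
--       if element == a:
--          last_a_index = i
--       elif element == b and last_a_index is not None and i - last_a_index >= min_distance:
--          pairs_count += 1
--
--    return pairs_count
-- ===== SOURCE B (Python) =====
-- def find_long_distance(lst, a, b):
--     """Count successor activity occurrences"""
--     n = len(lst)
--     apos = [i for i, x in enumerate(lst) if x == a]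
--     bounds = zip(apos, apos[1:] + [n])
--     return sum(lst[j + 2:end].count(b) for j, end in bounds)
-- ===== Notes on version B (the rewrite author's own statement) =====
-- stated objective: alternative
-- what changed: B replaces A's single stateful scan (running last-a-index and distance test per element) by a staged segment decomposition: it first collects all positions of a, then sums, for each consecutive pair of a-positions (j, next), the count of b in the slice lst[j+2:next] (last segment ends at len(lst)).
import Mathlib
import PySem

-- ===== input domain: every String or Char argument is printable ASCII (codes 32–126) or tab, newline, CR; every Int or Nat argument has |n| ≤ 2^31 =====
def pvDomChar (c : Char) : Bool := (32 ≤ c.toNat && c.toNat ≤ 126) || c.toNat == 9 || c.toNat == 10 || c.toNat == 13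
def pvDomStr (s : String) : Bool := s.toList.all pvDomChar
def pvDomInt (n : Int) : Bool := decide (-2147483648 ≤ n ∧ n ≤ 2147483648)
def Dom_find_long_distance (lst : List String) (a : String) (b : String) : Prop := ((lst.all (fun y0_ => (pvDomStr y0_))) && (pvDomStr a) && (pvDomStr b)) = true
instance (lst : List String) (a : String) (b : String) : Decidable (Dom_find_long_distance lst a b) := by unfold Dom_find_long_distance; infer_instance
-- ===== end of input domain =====

-- B replaces A's stateful element-by-element scan (running last-a-index + distance test) by a
-- staged decomposition: collect the positions of `a`, then sum the counts of `b` in the slices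
-- between consecutive `a`-positions (objective: alternative decomposition, same O(n) cost).

-- ===== PORT A =====
-- one loop iteration of A: `if element == a: last_a_index = i; elif element == b and …: pairs_count += 1`
def pvStepA (a b : String) (s : Int × Option Int) (ie : Int × String) : Int × Option Int :=
  if ie.2 == a then (s.1, some ie.1)
  else if ie.2 == b && s.2.elim false (fun j => decide (2 ≤ ie.1 - j)) then (s.1 + 1, s.2)
  else s

def find_long_distance (lst : List String) (a : String) (b : String) : Int :=
  ((PySem.List.enumerate lst 0).foldl (pvStepA a b) (0, none)).1

-- ===== PORT B =====
-- Source B: apos = [i for i, x in enumerate(lst) if x == a]; bounds = zip(apos, apos[1:] + [n]);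
--       return sum(lst[j + 2:end].count(b) for j, end in bounds)
def find_long_distance_alt (lst : List String) (a : String) (b : String) : Int :=
  let n : Int := (lst.length : Int)
  let apos : List Int := (PySem.List.enumerate lst 0).filterMap (fun p => if p.2 == a then some p.1 else none)
  let bounds : List (Int × Int) := List.zip apos (PySem.List.slice apos (some 1) none ++ [n])
  (bounds.map (fun je => ((PySem.List.count (PySem.List.slice lst (some (je.1 + 2)) (some je.2)) b : Nat) : Int))).sum

-- ===== PRECONDITION & SPEC =====
def Spec_find_long_distance (lst : List String) (a : String) (b : String) (out : Int) : Prop := out = find_long_distance_alt lst a b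
instance (lst : List String) (a : String) (b : String) (out : Int) : Decidable (Spec_find_long_distance lst a b out) := by unfold Spec_find_long_distance; infer_instance

-- ===== CLAIM (what is proved, stated in full; the proofs are below) =====
def Claim_equal_find_long_distance : Prop := ∀ (lst : List String) (a : String) (b : String), Dom_find_long_distance lst a b → Spec_find_long_distance lst a b (find_long_distance lst a b)

-- ===== LEMMAS AND PROOFS =====

-- the counted positions, characterised pointwise: lst[i] == b, some a at index ≤ i-2,
-- and neither lst[i-1] nor lst[i] equals a (so the LATEST a before i is ≥ 2 back)
def pvP (lst : List String) (a b : String) (i : Nat) : Bool :=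
  (lst.getD i "" == b) && ((List.range (i-1)).any (fun j => lst.getD j "" == a)) &&
  !(lst.getD (i-1) "" == a) && !(lst.getD i "" == a)

-- invariant for A's state: `last` is the largest index < n holding `a` (none if no such index)
def pvGA (lst : List String) (a : String) (last : Option Int) (n : Nat) : Prop :=
  match last with
  | none => ∀ j : Nat, j < n → lst.getD j "" ≠ a
  | some j => 0 ≤ j ∧ j.toNat < n ∧ lst.getD j.toNat "" = a ∧
      ∀ k : Nat, j.toNat < k → k < n → lst.getD k "" ≠ a

-- number of b's in the index interval [p+2, e)
def pvG (lst : List String) (b : String) (p e : Nat) : Nat :=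
  (List.range' (p+2) (e - (p+2))).countP (fun i => lst.getD i "" == b)

-- A's fold characterised: count = #{i < n : pvP i}, state = latest a below n
lemma pvMainA (lst : List String) (a b : String) :
    ∀ n, n ≤ lst.length →
      (((PySem.List.enumerate lst 0).take n).foldl (pvStepA a b) (0, none)).1
        = (((List.range n).countP (pvP lst a b) : Nat) : Int) ∧
      pvGA lst a (((PySem.List.enumerate lst 0).take n).foldl (pvStepA a b) (0, none)).2 n := by
  intro n
  induction n with
  | zero =>
    intro _
    refine ⟨rfl, ?_⟩
    intro j hj; omega
  | succ n ih =>
    intro hn1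
    have hn : n < lst.length := by omega
    obtain ⟨hc, hA⟩ := ih (by omega)
    have hget : (PySem.List.enumerate lst 0)[n]? = some ((n : Int), lst[n]) := by
      simp [PySem.List.getElem?_enumerate, List.getElem?_eq_getElem hn]
    have htake : (PySem.List.enumerate lst 0).take (n + 1)
        = (PySem.List.enumerate lst 0).take n ++ [((n : Int), lst[n])] := by
      rw [List.take_add_one, hget]; rfl
    set sA := ((PySem.List.enumerate lst 0).take n).foldl (pvStepA a b) (0, none) with hsA
    rw [htake, List.foldl_append]
    simp only [List.foldl_cons, List.foldl_nil]
    have hxval : lst.getD n "" = lst[n] := List.getD_eq_getElem lst "" hn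
    have hcount : List.range (n + 1) = List.range n ++ [n] := List.range_succ
    by_cases hxa : lst[n] = a
    · have hxaT : (lst[n] == a) = true := beq_iff_eq.mpr hxa
      have hstepA : pvStepA a b sA ((n : Int), lst[n]) = (sA.1, some ((n : Int))) := by
        simp [pvStepA, hxaT]
      have hPn : pvP lst a b n = false := by
        have hg : (lst.getD n "" == a) = true := by rw [hxval]; exact hxaT
        unfold pvP
        rw [hg]
        simp
      refine ⟨?_, ?_⟩
      · rw [hstepA, hcount, List.countP_append]
        simp [hPn, hc]
      · rw [hstepA]
        show pvGA lst a (some ((n : Int))) (n + 1)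
        refine ⟨Int.natCast_nonneg n, by simp, ?_, ?_⟩
        · rw [Int.toNat_natCast, hxval]; exact hxa
        · intro k hk1 hk2
          rw [Int.toNat_natCast] at hk1
          exact absurd hk2 (by omega)
    · have hxaF : (lst[n] == a) = false := beq_eq_false_iff_ne.mpr hxa
      have hxa' : lst.getD n "" ≠ a := by rw [hxval]; exact hxa
      have hstepA2 : (pvStepA a b sA ((n : Int), lst[n])).2 = sA.2 := by
        simp only [pvStepA, hxaF, Bool.false_eq_true, if_false]
        split <;> rfl
      have hany : (((List.range (n-1)).any (fun j => lst.getD j "" == a)) = true)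
          ↔ ∃ j, j < n - 1 ∧ lst.getD j "" = a := by
        simp [List.any_eq_true, List.mem_range]
      -- A's distance test agrees with the closed-form conjuncts of pvP
      have hiff : (sA.2.elim false (fun j => decide (2 ≤ ((n : Int)) - j)) = true)
          ↔ ((((List.range (n-1)).any (fun j => lst.getD j "" == a)) = true)
              ∧ (lst.getD (n-1) "" == a) = false) := by
        constructor
        · intro h
          match hlast : sA.2 with
          | none => rw [hlast] at h; exact absurd h (by simp)
          | some j =>
            rw [hlast] at h
            simp only [Option.elim] at h
            have hdist : (2 : Int) ≤ (n : Int) - j := of_decide_eq_true h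
            rw [hlast] at hA
            obtain ⟨hj0, hjn, hja, hmax⟩ := hA
            have hjt : (j.toNat : Int) = j := Int.toNat_of_nonneg hj0
            have hjle : j.toNat + 2 ≤ n := by omega
            refine ⟨hany.mpr ⟨j.toNat, by omega, hja⟩, ?_⟩
            have hsafe : lst.getD (n - 1) "" ≠ a := hmax (n - 1) (by omega) (by omega)
            simpa using hsafe
        · rintro ⟨hs, hprev⟩
          obtain ⟨j, hj2, hja⟩ := hany.mp hs
          have hn2 : 2 ≤ n := by omega
          match hlast : sA.2 with
          | none =>
            rw [hlast] at hA
            exact absurd hja (hA j (by omega))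
          | some m =>
            rw [hlast] at hA
            obtain ⟨hm0, hmn, hma, hmax⟩ := hA
            have hmt : (m.toNat : Int) = m := Int.toNat_of_nonneg hm0
            have hprev' : lst.getD (n - 1) "" ≠ a := by
              intro he; rw [he] at hprev; simp at hprev
            have hmne : m.toNat ≠ n - 1 := fun h => hprev' (h ▸ hma)
            have hjm : j ≤ m.toNat := by
              by_contra hlt
              exact hmax j (by omega) (by omega) hja
            have hm2 : m.toNat ≤ n - 2 := by omega
            simp only [Option.elim]
            exact decide_eq_true (by omega)
      have htest : ((lst[n] == b) && sA.2.elim false (fun j => decide (2 ≤ ((n : Int)) - j)))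
          = pvP lst a b n := by
        have h4 : (lst.getD n "" == a) = false := by rw [hxval]; exact hxaF
        have hb0 : (lst.getD n "" == b) = (lst[n] == b) := by rw [hxval]
        unfold pvP
        rw [h4, Bool.not_false, Bool.and_true, hb0]
        cases hb : (lst[n] == b) with
        | false => simp
        | true =>
          simp only [Bool.true_and]
          cases hE : sA.2.elim false (fun j => decide (2 ≤ ((n : Int)) - j)) with
          | true =>
            obtain ⟨h1, h2⟩ := hiff.mp hE
            rw [h1, h2]
            rfl
          | false =>
            cases hs1 : ((List.range (n-1)).any (fun j => lst.getD j "" == a)) with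
            | false => rfl
            | true =>
              cases hp : (lst.getD (n-1) "" == a) with
              | false => exact absurd (hiff.mpr ⟨hs1, hp⟩) (by rw [hE]; exact Bool.false_ne_true)
              | true => rfl
      have hstepA1 : (pvStepA a b sA ((n : Int), lst[n])).1
          = if pvP lst a b n = true then sA.1 + 1 else sA.1 := by
        rw [← htest]
        simp only [pvStepA, hxaF, Bool.false_eq_true, if_false]
        split_ifs <;> rfl
      refine ⟨?_, ?_⟩
      · rw [hstepA1, hcount, List.countP_append, hc]
        by_cases hp : pvP lst a b n = true
        · rw [if_pos hp]
          have h1 : List.countP (pvP lst a b) [n] = 1 := by simp [hp]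
          rw [h1]
          push_cast
          ring
        · rw [if_neg hp]
          rw [Bool.not_eq_true] at hp
          have h1 : List.countP (pvP lst a b) [n] = 0 := by simp [hp]
          rw [h1, Nat.add_zero]
      · rw [hstepA2]
        match hlast : sA.2 with
        | none =>
          rw [hlast] at hA
          intro j hj
          rcases Nat.lt_or_ge j n with h | h
          · exact hA j h
          · have hjn : j = n := by omega
            rw [hjn]; exact hxa'
        | some j =>
          rw [hlast] at hA
          obtain ⟨hj0, hjn, hja, hmax⟩ := hA
          refine ⟨hj0, by omega, hja, ?_⟩
          intro k hk1 hk2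
          rcases Nat.lt_or_ge k n with h | h
          · exact hmax k hk1 h
          · have hkn : k = n := by omega
            rw [hkn]; exact hxa'

-- reading the list through an index interval
lemma pvMapGet (lst : List String) :
    ∀ (m s : Nat), s + m ≤ lst.length →
      (List.range' s m).map (fun i => lst.getD i "") = (lst.drop s).take m := by
  intro m
  induction m with
  | zero => intro s _; simp
  | succ m ih =>
    intro s hs
    have hslen : s < lst.length := by omega
    rw [List.range'_succ, List.map_cons, ih (s+1) (by omega),
        List.drop_eq_getElem_cons hslen, List.take_succ_cons, List.getD_eq_getElem lst "" hslen]

-- a slice count is a countP over the index interval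
lemma pvSliceCount (lst : List String) (b : String) (s e : Nat) (he : e ≤ lst.length) :
    (PySem.List.count (PySem.List.slice lst (some ((s : Nat) : Int)) (some ((e : Nat) : Int))) b : Nat)
      = (List.range' s (e - s)).countP (fun i => lst.getD i "" == b) := by
  rw [PySem.List.slice_natCast, PySem.List.count_eq]
  rcases Nat.le_total e s with h | h
  · have h0 : e - s = 0 := by omega
    simp [h0]
  · rw [← pvMapGet lst (e - s) s (by omega), List.count_eq_countP, List.countP_map]
    rfl

-- splitting an index interval at an interior point
lemma pvRangeSplit : ∀ (m k s : Nat), m ≤ k →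
    List.range' s k = List.range' s m ++ List.range' (s + m) (k - m) := by
  intro m
  induction m with
  | zero => intro k s _; simp
  | succ m ih =>
    intro k s h
    obtain ⟨k', rfl⟩ : ∃ k', k = k' + 1 := ⟨k - 1, by omega⟩
    rw [List.range'_succ, List.range'_succ, List.cons_append, ih k' (s+1) (by omega),
        show (s+1) + m = s + (m+1) from by omega, show k' + 1 - (m+1) = k' - m from by omega]

-- one segment: strictly between two consecutive a-positions pvP is exactly "== b" from distance 2 on
lemma pvBlock (lst : List String) (a b : String) (j k : Nat)
    (hjk : j < k)
    (hja : lst.getD j "" = a) (hnoa : ∀ i, j < i → i < k → lst.getD i "" ≠ a) :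
    (List.range' (j+1) (k - (j+1))).countP (pvP lst a b) = pvG lst b j k := by
  rcases Nat.lt_or_ge (j+1) k with hlt | hge
  · rw [show k - (j+1) = (k - (j+2)) + 1 from by omega, List.range'_succ, List.countP_cons]
    have hP1 : pvP lst a b (j+1) = false := by
      have hg : (lst.getD (j+1-1) "" == a) = true := by
        rw [Nat.add_sub_cancel]
        exact beq_iff_eq.mpr hja
      unfold pvP
      rw [hg]
      simp
    rw [hP1]
    simp only [if_false, Bool.false_eq_true, add_zero]
    unfold pvG
    apply List.countP_congr
    intro i hi
    rw [List.mem_range'_1] at hi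
    obtain ⟨hi1, hi2⟩ := hi
    have hik : i < k := by omega
    have h1 : ((List.range (i-1)).any (fun t => lst.getD t "" == a)) = true := by
      rw [List.any_eq_true]
      exact ⟨j, List.mem_range.mpr (by omega), beq_iff_eq.mpr hja⟩
    have h2 : (lst.getD (i-1) "" == a) = false :=
      beq_eq_false_iff_ne.mpr (hnoa (i-1) (by omega) (by omega))
    have h3 : (lst.getD i "" == a) = false :=
      beq_eq_false_iff_ne.mpr (hnoa i (by omega) hik)
    have hiff : pvP lst a b i = (lst.getD i "" == b) := by
      unfold pvP
      rw [h1, h2, h3]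
      simp
    rw [hiff]
  · have h1 : k - (j+1) = 0 := by omega
    have h2 : k - (j+2) = 0 := by omega
    simp [pvG, h1, h2]

-- segment recursion: summing the per-segment b-counts from one a-position onwards
lemma pvSeg (lst : List String) (a b : String) :
    ∀ (Q : List Nat) (j : Nat), j < lst.length → lst.getD j "" = a →
      (∀ i, i ∈ Q ↔ (j < i ∧ i < lst.length ∧ lst.getD i "" = a)) → Q.Pairwise (· < ·) →
      ((List.zip (j :: Q) (Q ++ [lst.length])).map (fun pe => pvG lst b pe.1 pe.2)).sum
        = (List.range' (j+1) (lst.length - (j+1))).countP (pvP lst a b) := by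
  intro Q
  induction Q with
  | nil =>
    intro j hj hja hchar _
    have hnoa : ∀ i, j < i → i < lst.length → lst.getD i "" ≠ a := by
      intro i h1 h2 h3
      exact absurd ((hchar i).mpr ⟨h1, h2, h3⟩) (List.not_mem_nil)
    simp only [List.nil_append, List.zip_cons_cons, List.zip_nil_right, List.map_cons,
      List.map_nil, List.sum_cons, List.sum_nil, add_zero]
    exact (pvBlock lst a b j lst.length hj hja hnoa).symm
  | cons k Q' ih =>
    intro j hj hja hchar hpw
    obtain ⟨hjk, hkn, hka⟩ := (hchar k).mp (List.mem_cons_self)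
    rw [List.pairwise_cons] at hpw
    obtain ⟨hklt, hpw'⟩ := hpw
    have hchar' : ∀ i, i ∈ Q' ↔ (k < i ∧ i < lst.length ∧ lst.getD i "" = a) := by
      intro i
      constructor
      · intro hi
        obtain ⟨-, h2, h3⟩ := (hchar i).mp (List.mem_cons_of_mem k hi)
        exact ⟨hklt i hi, h2, h3⟩
      · rintro ⟨h1, h2, h3⟩
        have := (hchar i).mpr ⟨by omega, h2, h3⟩
        rcases List.mem_cons.mp this with h | h
        · omega
        · exact h
    have hnoa : ∀ i, j < i → i < k → lst.getD i "" ≠ a := by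
      intro i h1 h2 h3
      have := (hchar i).mpr ⟨h1, by omega, h3⟩
      rcases List.mem_cons.mp this with h | h
      · omega
      · exact absurd (hklt i h) (by omega)
    have hrec := ih k hkn hka hchar' hpw'
    -- split the interval [j+1, n) at k
    have hr1 : List.range' (j+1) (lst.length - (j+1))
        = List.range' (j+1) (k - (j+1)) ++ List.range' k (lst.length - k) := by
      have h := pvRangeSplit (k - (j+1)) (lst.length - (j+1)) (j+1) (by omega)
      rw [show (j+1) + (k - (j+1)) = k from by omega,
          show lst.length - (j+1) - (k - (j+1)) = lst.length - k from by omega] at h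
      exact h
    have hr2 : List.range' k (lst.length - k) = k :: List.range' (k+1) (lst.length - (k+1)) := by
      rw [show lst.length - k = (lst.length - (k+1)) + 1 from by omega, List.range'_succ]
    have hPk : pvP lst a b k = false := by
      have hg : (lst.getD k "" == a) = true := beq_iff_eq.mpr hka
      unfold pvP
      rw [hg]
      simp
    rw [List.cons_append, List.zip_cons_cons, List.map_cons, List.sum_cons]
    rw [hrec, hr1, hr2, List.countP_append, List.countP_cons, hPk]
    simp only [if_false, Bool.false_eq_true, add_zero]
    rw [pvBlock lst a b j k hjk hja hnoa]
-- the comprehension `[i for i, x in enumerate(lst) if x == a]` as a filter of range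
lemma pvAposEq (a : String) :
    ∀ (xs : List String) (s : Nat),
      (PySem.List.enumerate xs ((s : Nat) : Int)).filterMap (fun p => if p.2 == a then some p.1 else none)
        = ((List.range xs.length).filter (fun i => xs.getD i "" == a)).map (fun i => ((s + i : Nat) : Int)) := by
  intro xs
  induction xs with
  | nil => intro s; simp [PySem.List.enumerate_nil]
  | cons x t ih =>
    intro s
    have hcast : ((s : Int) + 1) = (((s + 1 : Nat)) : Int) := by push_cast; ring
    have hp : ((fun i => List.getD (x :: t) i "" == a) ∘ Nat.succ) = (fun i => t.getD i "" == a) := by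
      funext i; simp
    have hfun : ((fun i : Nat => ((s + i : Nat) : Int)) ∘ Nat.succ) = (fun i : Nat => ((s + 1 + i : Nat) : Int)) := by
      funext i
      simp only [Function.comp]
      congr 1
      omega
    rw [PySem.List.enumerate_cons, List.filterMap_cons, hcast, ih (s+1)]
    rw [List.length_cons, List.range_succ_eq_map, List.filter_cons]
    simp only [List.getD_cons_zero, List.filter_map, hp]
    by_cases hx : (x == a) = true
    · rw [if_pos hx, if_pos hx, List.map_cons, List.map_map, hfun]
      congr 1
    · rw [if_neg hx, if_neg hx, List.map_map, hfun]

-- casting a Nat-valued sum to Int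
lemma pvSumCast {α : Type} (l : List α) (f : α → Nat) :
    (l.map (fun x => ((f x : Nat) : Int))).sum = (((l.map f).sum : Nat) : Int) := by
  induction l with
  | nil => simp
  | cons x t ih => simp [ih]

-- ===== VERDICT (by name: the statement is the Claim_ definition above) =====
theorem find_long_distance_spec : Claim_equal_find_long_distance := by
  intro lst a b _
  unfold Spec_find_long_distance find_long_distance find_long_distance_alt
  obtain ⟨hcA, -⟩ := pvMainA lst a b lst.length le_rfl
  have hfull : (PySem.List.enumerate lst 0).take lst.length = PySem.List.enumerate lst 0 := by
    rw [← PySem.List.length_enumerate lst 0, List.take_length]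
  rw [hfull] at hcA
  rw [hcA]
  have hapos : (PySem.List.enumerate lst 0).filterMap (fun p => if p.2 == a then some p.1 else none)
      = ((List.range lst.length).filter (fun i => lst.getD i "" == a)).map (fun i => ((i : Nat) : Int)) := by
    have h := pvAposEq a lst 0
    simpa using h
  simp only [hapos]
  set Q := (List.range lst.length).filter (fun i => lst.getD i "" == a) with hQ
  have hmemQ : ∀ i, i ∈ Q ↔ (i < lst.length ∧ lst.getD i "" = a) := by
    intro i
    rw [hQ, List.mem_filter, List.mem_range]
    simp
  have hpwQ : Q.Pairwise (· < ·) := List.Pairwise.filter _ (List.pairwise_lt_range)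
  match hQs : Q with
  | [] =>
    have hnoa : ∀ i, i < lst.length → lst.getD i "" ≠ a := by
      intro i h1 h2
      exact absurd ((hmemQ i).mpr ⟨h1, h2⟩) (List.not_mem_nil)
    have hz : (List.range lst.length).countP (pvP lst a b) = 0 := by
      rw [List.countP_eq_zero]
      intro i hi
      rw [List.mem_range] at hi
      have hanyF : ((List.range (i-1)).any (fun j => lst.getD j "" == a)) = false := by
        rw [Bool.eq_false_iff]
        intro hc
        rw [List.any_eq_true] at hc
        obtain ⟨j, hjm, hja⟩ := hc
        rw [List.mem_range] at hjm
        exact hnoa j (by omega) (beq_iff_eq.mp hja)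
      rw [Bool.not_eq_true]
      unfold pvP
      rw [hanyF]
      simp
    rw [hz]
    simp [PySem.List.slice_from_one]
  | j0 :: Q' =>
    obtain ⟨hj0n, hj0a⟩ := (hmemQ j0).mp (List.mem_cons_self)
    rw [List.pairwise_cons] at hpwQ
    obtain ⟨hlt', hpw'⟩ := hpwQ
    have hchar' : ∀ i, i ∈ Q' ↔ (j0 < i ∧ i < lst.length ∧ lst.getD i "" = a) := by
      intro i
      constructor
      · intro hi
        obtain ⟨h1, h2⟩ := (hmemQ i).mp (List.mem_cons_of_mem j0 hi)
        exact ⟨hlt' i hi, h1, h2⟩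
      · rintro ⟨h1, h2, h3⟩
        have hm := (hmemQ i).mpr ⟨h2, h3⟩
        rcases List.mem_cons.mp hm with h | h
        · omega
        · exact h
    have hmin : ∀ i, i < j0 → lst.getD i "" ≠ a := by
      intro i h1 h2
      have hm := (hmemQ i).mpr ⟨by omega, h2⟩
      rcases List.mem_cons.mp hm with h | h
      · omega
      · exact absurd (hlt' i h) (by omega)
    -- B's sum, in Nat form
    have htail : PySem.List.slice ((j0 :: Q').map (fun i => ((i : Nat) : Int))) (some 1) none
        ++ [((lst.length : Nat) : Int)]
        = (Q' ++ [lst.length]).map (fun i => ((i : Nat) : Int)) := by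
      rw [PySem.List.slice_from_one]
      simp
    rw [htail, List.zip_map, List.map_map]
    have hterm : ∀ pe ∈ List.zip (j0 :: Q') (Q' ++ [lst.length]),
        ((fun je : Int × Int => ((PySem.List.count (PySem.List.slice lst (some (je.1 + 2)) (some je.2)) b : Nat) : Int))
          ∘ Prod.map (fun i : Nat => ((i : Nat) : Int)) (fun i : Nat => ((i : Nat) : Int))) pe
        = (((pvG lst b pe.1 pe.2 : Nat)) : Int) := by
      rintro ⟨p, e⟩ hpe
      obtain ⟨hpmem, hemem⟩ := List.of_mem_zip hpe
      have hele : e ≤ lst.length := by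
        rcases List.mem_append.mp hemem with h | h
        · exact le_of_lt ((hchar' e).mp h).2.1
        · rw [List.mem_singleton.mp h]
      simp only [Function.comp, Prod.map]
      rw [show ((p : Nat) : Int) + 2 = (((p + 2 : Nat)) : Int) from by push_cast; ring]
      rw [pvSliceCount lst b (p+2) e hele]
      rfl
    rw [List.map_congr_left hterm, pvSumCast]
    -- both sides are now casts of Nat counts
    congr 1
    have hsplit : List.range lst.length
        = List.range (j0+1) ++ List.range' (j0+1) (lst.length - (j0+1)) := by
      rw [List.range_eq_range', List.range_eq_range']
      have h := pvRangeSplit (j0+1) lst.length 0 (by omega)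
      rw [show (0 : Nat) + (j0+1) = j0+1 from by omega] at h
      exact h
    have hpre : (List.range (j0+1)).countP (pvP lst a b) = 0 := by
      rw [List.countP_eq_zero]
      intro i hi
      rw [List.mem_range] at hi
      rcases Nat.lt_or_ge i j0 with h | h
      · have hanyF : ((List.range (i-1)).any (fun j => lst.getD j "" == a)) = false := by
          rw [Bool.eq_false_iff]
          intro hc
          rw [List.any_eq_true] at hc
          obtain ⟨j, hjm, hja⟩ := hc
          rw [List.mem_range] at hjm
          exact hmin j (by omega) (beq_iff_eq.mp hja)
        rw [Bool.not_eq_true]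
        unfold pvP
        rw [hanyF]
        simp
      · have hij : i = j0 := by omega
        rw [Bool.not_eq_true, hij]
        have hg : (lst.getD j0 "" == a) = true := beq_iff_eq.mpr hj0a
        unfold pvP
        rw [hg]
        simp
    rw [hsplit, List.countP_append, hpre, Nat.zero_add]
    exact (pvSeg lst a b Q' j0 hj0n hj0a hchar' hpw').symm
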